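-- pv_equiv track=rewrite | github.com/Wood-Q/MokioAgent | src/mokioclaw/core/project_rules.py | _find_import_tokens
-- ===== SOURCE A (Python) =====
-- def _find_import_tokens(line: str) -> list[str]:
--     tokens: list[str] = []
--     in_inline_code = False
--     index = 0
--
--     while index < len(line):
--         char = line[index]
--         if char == "`":
--             in_inline_code = not in_inline_code
--             index += 1
--             continue
--         if (
--             not in_inline_code
--             and char == "@"
--             and (index == 0 or line[index - 1].isspace() or line[index - 1] in "([{-:")
--         ):
--             end = index + 1
--             while (
--                 end < len(line)
--                 and not line[end].isspace()
--                 and line[end] not in ",;)]}>"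
--             ):
--                 end += 1
--             token = line[index + 1 : end].strip()
--             if token:
--                 tokens.append(token)
--             index = end
--             continue
--         index += 1
--
--     return tokens
-- ===== SOURCE B (Python) =====
-- import re
--
-- # One regex over the outside-code text: a backtick, or an '@'-token whose '@' is at
-- # the start of the string or preceded by whitespace or one of "([{-:".  Inside inline
-- # code only backticks are events, so a second regex finds just those.  The scanner
-- # jumps from event to event with pattern.search(line, pos) instead of walking chars.
-- _EVENT_RE = re.compile(r"`|(?:^|(?<=[\s([{\-:]))@([^\s,;)\]}>]*)")
-- _TICK_RE = re.compile(r"`")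
--
-- def _find_import_tokens(line: str) -> list[str]:
--     tokens: list[str] = []
--     pos = 0
--     in_inline_code = False
--     while True:
--         m = (_TICK_RE if in_inline_code else _EVENT_RE).search(line, pos)
--         if m is None:
--             return tokens
--         if m.group(0) == "`":
--             in_inline_code = not in_inline_code
--         else:
--             token = m.group(1)
--             if token:
--                 tokens.append(token)
--         pos = m.end()
-- ===== Notes on version B (the rewrite author's own statement) =====
-- stated objective: idiomatic
-- what changed: A's hand-written char-by-char state machine is replaced by a regex scanner that jumps from event to event ('`' or a valid '@'-token) with pattern.search(line, pos), choosing the pattern by the inline-code state.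
import Mathlib
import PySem

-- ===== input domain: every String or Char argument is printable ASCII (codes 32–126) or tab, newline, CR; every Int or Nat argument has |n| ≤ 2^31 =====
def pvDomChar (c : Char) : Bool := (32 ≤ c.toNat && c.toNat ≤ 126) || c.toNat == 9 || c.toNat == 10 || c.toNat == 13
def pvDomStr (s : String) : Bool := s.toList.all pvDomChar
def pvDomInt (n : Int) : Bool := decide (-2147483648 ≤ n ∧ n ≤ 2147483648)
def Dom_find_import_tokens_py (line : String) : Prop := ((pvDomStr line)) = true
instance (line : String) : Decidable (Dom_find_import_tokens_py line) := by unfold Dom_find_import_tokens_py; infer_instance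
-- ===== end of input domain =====

-- B replaces A's char-by-char state machine by a regex scanner that jumps from event to
-- event ('`' or a valid '@'-token) with pattern.search(line, pos); objective: idiomatic.


-- ===== PORT A =====
-- inner while: end advances while line[end] is neither whitespace nor in ",;)]}>"
def pvTokenEndA (cs : List Char) (e : Nat) : Nat :=
  if h : e < cs.length then
    if !(PySem.Chars.isspace cs[e]) && !(PySem.Chars.isIn [cs[e]] ",;)]}>".toList) then
      pvTokenEndA cs (e + 1)
    else e
  else e
termination_by cs.length - e

theorem pvTokenEndA_ge (cs : List Char) (e : Nat) : e ≤ pvTokenEndA cs e := by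
  fun_induction pvTokenEndA cs e with
  | case1 _ _ _ ih => omega
  | case2 => omega
  | case3 => omega

-- the outer while over index, carrying in_inline_code and the accumulated tokens
def pvLoopA (cs : List Char) (i : Nat) (code : Bool) (acc : List String) : List String :=
  if h : i < cs.length then
    if cs[i] = '`' then
      pvLoopA cs (i + 1) (!code) acc
    else if !code && (cs[i] == '@') &&
        (decide (i = 0) || PySem.Chars.isspace (cs.getD (i - 1) ' ')
          || PySem.Chars.isIn [cs.getD (i - 1) ' '] "([{-:".toList) then
      let e := pvTokenEndA cs (i + 1)
      let token := PySem.Chars.strip (PySem.List.slice cs (some ((i : Int) + 1)) (some (e : Int)))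
      pvLoopA cs e code (if token ≠ [] then acc ++ [String.ofList token] else acc)
    else
      pvLoopA cs (i + 1) code acc
  else acc
termination_by cs.length - i
decreasing_by
  · omega
  · have := pvTokenEndA_ge cs (i + 1); omega
  · omega

def find_import_tokens_py (line : String) : List String :=
  pvLoopA line.toList 0 false []

-- ===== PORT B =====
-- regex char class [^\s,;)\]}>] (token characters); \s ported as Python whitespace (isspace)
def pvTokChar (c : Char) : Bool :=
  !(PySem.Chars.isspace c) && !([',', ';', ')', ']', '}', '>'].contains c)
-- regex lookbehind class [\s([{\-:]
def pvPrevChar (c : Char) : Bool :=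
  PySem.Chars.isspace c || ['(', '[', '{', '-', ':'].contains c

-- _TICK_RE.search(line, pos): position of the next '`' at or after pos
def pvSearchTick (cs : List Char) (pos : Nat) : Option Nat :=
  if h : pos < cs.length then
    if cs[pos] = '`' then some pos else pvSearchTick cs (pos + 1)
  else none
termination_by cs.length - pos

-- _EVENT_RE.search(line, pos): the next '`' (group1 = none) or '@' with a valid left
-- context ('^' only at index 0, lookbehind otherwise), with its greedy group1
def pvSearchEvent (cs : List Char) (pos : Nat) : Option (Nat × Option (List Char)) :=
  if h : pos < cs.length then
    if cs[pos] = '`' then some (pos, none)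
    else if (cs[pos] == '@') && (decide (pos = 0) || pvPrevChar (cs.getD (pos - 1) ' ')) then
      some (pos, some ((cs.drop (pos + 1)).takeWhile pvTokChar))
    else pvSearchEvent cs (pos + 1)
  else none
termination_by cs.length - pos

theorem pvSearchTick_lt (cs : List Char) (pos j : Nat) (h : pvSearchTick cs pos = some j) :
    pos ≤ j ∧ j < cs.length := by
  fun_induction pvSearchTick cs pos with
  | case1 => simp_all; omega
  | case2 _ _ _ ih => have := ih h; omega
  | case3 => simp_all

theorem pvSearchEvent_lt (cs : List Char) (pos : Nat) (j : Nat) (g : Option (List Char))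
    (h : pvSearchEvent cs pos = some (j, g)) : pos ≤ j ∧ j < cs.length := by
  fun_induction pvSearchEvent cs pos with
  | case1 => simp_all; omega
  | case2 => simp_all; omega
  | case3 _ _ _ _ ih => have := ih h; omega
  | case4 => simp_all

-- the while True scanner: search from pos with the regex chosen by the state
def pvLoopB (cs : List Char) (pos : Nat) (code : Bool) (acc : List String) : List String :=
  if code then
    match h : pvSearchTick cs pos with
    | none => acc
    | some j => pvLoopB cs (j + 1) false acc
  else
    match h : pvSearchEvent cs pos with
    | none => acc
    | some (j, none) => pvLoopB cs (j + 1) true acc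
    | some (j, some grp) =>
        pvLoopB cs (j + 1 + grp.length) false
          (if grp ≠ [] then acc ++ [String.ofList grp] else acc)
termination_by cs.length - pos
decreasing_by
  · have := pvSearchTick_lt cs pos j h; omega
  · have := pvSearchEvent_lt cs pos j none h; omega
  · have := pvSearchEvent_lt cs pos j (some grp) h; omega

def find_import_tokens_py_alt (line : String) : List String :=
  pvLoopB line.toList 0 false []

-- ===== PRECONDITION & SPEC =====
def Spec_find_import_tokens_py (line : String) (out : List String) : Prop := out = find_import_tokens_py_alt line
instance (line : String) (out : List String) : Decidable (Spec_find_import_tokens_py line out) := by unfold Spec_find_import_tokens_py; infer_instance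

-- ===== CLAIM (what is proved, stated in full; the proofs are below) =====
def Claim_equal_find_import_tokens_py : Prop := ∀ (line : String), Dom_find_import_tokens_py line → Spec_find_import_tokens_py line (find_import_tokens_py line)

-- ===== LEMMAS AND PROOFS =====

theorem pvIsIn_singleton (c : Char) (l : List Char) : PySem.Chars.isIn [c] l = l.contains c := by
  by_cases h : c ∈ l
  · rw [(PySem.Chars.isIn_iff_infix [c] l).2 ((List.singleton_infix_iff c l).2 h),
      List.contains_eq_mem]
    simp [h]
  · have hf : PySem.Chars.isIn [c] l = false := by
      rw [Bool.eq_false_iff]; intro ht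
      exact h ((List.singleton_infix_iff c l).1 ((PySem.Chars.isIn_iff_infix [c] l).1 ht))
    rw [hf, List.contains_eq_mem]; simp [h]

-- A's inner-while continuation condition is B's token-char class
theorem pvCond_eq_tokChar (c : Char) :
    (!(PySem.Chars.isspace c) && !(PySem.Chars.isIn [c] ",;)]}>".toList)) = pvTokChar c := by
  rw [pvIsIn_singleton, show ",;)]}>".toList = [',', ';', ')', ']', '}', '>'] from by decide]
  rfl

-- A's left-context test is B's lookbehind class
theorem pvPrev_eq (c : Char) :
    (PySem.Chars.isspace c || PySem.Chars.isIn [c] "([{-:".toList) = pvPrevChar c := by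
  rw [pvIsIn_singleton, show "([{-:".toList = ['(', '[', '{', '-', ':'] from by decide]
  rfl

theorem pvTake_takeWhile (l : List Char) (p : Char → Bool) :
    l.take ((l.takeWhile p).length) = l.takeWhile p := by
  induction l with
  | nil => rfl
  | cons a t ih => by_cases h : p a <;> simp [h, ih]

theorem pvStrip_of_noSpace (l : List Char) (h : ∀ c ∈ l, PySem.Chars.isspace c = false) :
    PySem.Chars.strip l = l := by
  unfold PySem.Chars.strip PySem.Chars.lstrip PySem.Chars.rstrip
  rw [List.dropWhile_eq_self_iff.2, List.dropWhile_eq_self_iff.2, List.reverse_reverse]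
  · intro hl; simp [h _ (List.getElem_mem hl)]
  · intro hl
    simp only [Bool.not_eq_true, List.getElem_reverse]
    exact h _ ((List.dropWhile_sublist _).subset (List.getElem_mem _))

-- A's token end equals the start plus the length of B's regex group
theorem pvTokenEndA_eq (cs : List Char) (e : Nat) :
    pvTokenEndA cs e = e + ((cs.drop e).takeWhile pvTokChar).length := by
  fun_induction pvTokenEndA cs e with
  | case1 e h hc ih =>
    rw [ih]
    rw [show cs.drop e = cs[e] :: cs.drop (e + 1) from (List.getElem_cons_drop h).symm,
      List.takeWhile_cons, if_pos (pvCond_eq_tokChar cs[e] ▸ hc)]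
    simp; omega
  | case2 e h hc =>
    rw [show cs.drop e = cs[e] :: cs.drop (e + 1) from (List.getElem_cons_drop h).symm,
      List.takeWhile_cons]
    rw [pvCond_eq_tokChar] at hc
    simp only [Bool.not_eq_true] at hc
    simp [hc]
  | case3 e h =>
    rw [List.drop_eq_nil_of_le (by omega)]
    simp

-- A's sliced-and-stripped token equals B's regex group
theorem pvToken_eq (cs : List Char) (i : Nat) :
    PySem.Chars.strip (PySem.List.slice cs (some ((i : Int) + 1))
        (some ((pvTokenEndA cs (i + 1) : Int)))) =
      (cs.drop (i + 1)).takeWhile pvTokChar := by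
  rw [show ((i : Int) + 1) = ((i + 1 : Nat) : Int) from by push_cast; ring,
    pvTokenEndA_eq, PySem.List.slice_natCast,
    show i + 1 + ((cs.drop (i + 1)).takeWhile pvTokChar).length - (i + 1)
      = ((cs.drop (i + 1)).takeWhile pvTokChar).length from by omega,
    pvTake_takeWhile]
  apply pvStrip_of_noSpace
  intro c hc
  have h1 := List.mem_takeWhile_imp hc
  unfold pvTokChar at h1
  rcases Bool.and_eq_true_iff.1 h1 with ⟨h2, _⟩
  simpa using h2

-- unfolding lemmas for pvLoopB, one per search outcome
theorem pvLoopB_true_none (cs : List Char) (pos : Nat) (acc : List String)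
    (hs : pvSearchTick cs pos = none) : pvLoopB cs pos true acc = acc := by
  rw [pvLoopB]
  simp only [if_true]
  split <;> simp_all

theorem pvLoopB_true_some (cs : List Char) (pos j : Nat) (acc : List String)
    (hs : pvSearchTick cs pos = some j) :
    pvLoopB cs pos true acc = pvLoopB cs (j + 1) false acc := by
  rw [pvLoopB]
  simp only [if_true]
  split <;> simp_all

theorem pvLoopB_false_none (cs : List Char) (pos : Nat) (acc : List String)
    (hs : pvSearchEvent cs pos = none) : pvLoopB cs pos false acc = acc := by
  rw [pvLoopB]
  simp only [Bool.false_eq_true, if_false]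
  split <;> simp_all

theorem pvLoopB_false_tick (cs : List Char) (pos j : Nat) (acc : List String)
    (hs : pvSearchEvent cs pos = some (j, none)) :
    pvLoopB cs pos false acc = pvLoopB cs (j + 1) true acc := by
  rw [pvLoopB]
  simp only [Bool.false_eq_true, if_false]
  split <;> simp_all

theorem pvLoopB_false_tok (cs : List Char) (pos j : Nat) (grp : List Char) (acc : List String)
    (hs : pvSearchEvent cs pos = some (j, some grp)) :
    pvLoopB cs pos false acc
      = pvLoopB cs (j + 1 + grp.length) false
          (if grp ≠ [] then acc ++ [String.ofList grp] else acc) := by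
  rw [pvLoopB]
  simp only [Bool.false_eq_true, if_false]
  split <;> simp_all

-- non-event characters do not change a search result
theorem pvSearchTick_skip (cs : List Char) (i : Nat) (h : i < cs.length) (hc : cs[i] ≠ '`') :
    pvSearchTick cs i = pvSearchTick cs (i + 1) := by
  rw [pvSearchTick]; simp [h, hc]

theorem pvSearchEvent_skip (cs : List Char) (i : Nat) (h : i < cs.length) (hc : cs[i] ≠ '`')
    (ha : ¬(cs[i] = '@' ∧ (i = 0 ∨ pvPrevChar (cs.getD (i - 1) ' ') = true))) :
    pvSearchEvent cs i = pvSearchEvent cs (i + 1) := by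
  rw [pvSearchEvent]
  rw [dif_pos h, if_neg hc, if_neg]
  simp only [Bool.and_eq_true, beq_iff_eq, Bool.or_eq_true, decide_eq_true_eq]
  tauto

theorem pvLoopB_skipTick (cs : List Char) (i : Nat) (acc : List String)
    (hs : pvSearchTick cs i = pvSearchTick cs (i + 1)) :
    pvLoopB cs i true acc = pvLoopB cs (i + 1) true acc := by
  cases hr : pvSearchTick cs (i + 1) with
  | none => rw [pvLoopB_true_none _ _ _ (hs.trans hr), pvLoopB_true_none _ _ _ hr]
  | some j => rw [pvLoopB_true_some _ _ _ _ (hs.trans hr), pvLoopB_true_some _ _ _ _ hr]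

theorem pvLoopB_skipEvent (cs : List Char) (i : Nat) (acc : List String)
    (hs : pvSearchEvent cs i = pvSearchEvent cs (i + 1)) :
    pvLoopB cs i false acc = pvLoopB cs (i + 1) false acc := by
  cases hr : pvSearchEvent cs (i + 1) with
  | none => rw [pvLoopB_false_none _ _ _ (hs.trans hr), pvLoopB_false_none _ _ _ hr]
  | some p =>
    rcases p with ⟨j, g⟩
    cases g with
    | none => rw [pvLoopB_false_tick _ _ _ _ (hs.trans hr), pvLoopB_false_tick _ _ _ _ hr]
    | some grp =>
      rw [pvLoopB_false_tok _ _ _ _ _ (hs.trans hr), pvLoopB_false_tok _ _ _ _ _ hr]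

-- the heart of the proof: A's char-by-char loop equals B's event scanner from any state
theorem pvLoop_eq (cs : List Char) (i : Nat) (code : Bool) (acc : List String) :
    pvLoopA cs i code acc = pvLoopB cs i code acc := by
  fun_induction pvLoopA cs i code acc with
  | case1 i code acc h hbt ih =>
    -- backtick: both sides toggle and continue at i + 1
    rw [ih]
    cases code
    · have hse : pvSearchEvent cs i = some (i, none) := by rw [pvSearchEvent]; simp [h, hbt]
      rw [pvLoopB_false_tick _ _ _ _ hse]; simp
    · have hst : pvSearchTick cs i = some i := by rw [pvSearchTick]; simp [h, hbt]
      rw [pvLoopB_true_some _ _ _ _ hst]; simp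
  | case2 i code acc h hbt hat e token ih =>
    -- '@'-token: the event search finds i with the same group, end and append
    have hcode : code = false := by cases code <;> simp_all
    subst hcode
    simp only [dite_eq_ite] at ih
    rw [ih]
    have hse : pvSearchEvent cs i
        = some (i, some ((cs.drop (i + 1)).takeWhile pvTokChar)) := by
      rw [pvSearchEvent]
      rw [dif_pos h, if_neg hbt, if_pos]
      rw [← pvPrev_eq]
      simp only [Bool.and_eq_true, beq_iff_eq, Bool.or_eq_true, decide_eq_true_eq] at hat ⊢
      tauto
    rw [pvLoopB_false_tok _ _ _ _ _ hse]
    show pvLoopB cs e false _ = _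
    rw [show e = i + 1 + ((cs.drop (i + 1)).takeWhile pvTokChar).length from pvTokenEndA_eq cs (i + 1),
      show token = (cs.drop (i + 1)).takeWhile pvTokChar from pvToken_eq cs i]
  | case3 i code acc h hbt hat ih =>
    -- no event at i: the search result is unchanged, step to i + 1
    rw [ih]
    cases code
    · refine (pvLoopB_skipEvent cs i acc (pvSearchEvent_skip cs i h hbt ?_)).symm
      rw [← pvPrev_eq]
      simp only [Bool.and_eq_true, beq_iff_eq, Bool.or_eq_true, decide_eq_true_eq,
        not_and, not_or] at hat ⊢
      tauto
    · exact (pvLoopB_skipTick cs i acc (pvSearchTick_skip cs i h hbt)).symm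
  | case4 i code acc h =>
    have ht : pvSearchTick cs i = none := by rw [pvSearchTick]; simp; omega
    have he : pvSearchEvent cs i = none := by rw [pvSearchEvent]; simp; omega
    cases code
    · rw [pvLoopB_false_none _ _ _ he]
    · rw [pvLoopB_true_none _ _ _ ht]

-- ===== VERDICT (by name: the statement is the Claim_ definition above) =====
theorem find_import_tokens_py_spec : Claim_equal_find_import_tokens_py := by
  intro line _
  unfold Spec_find_import_tokens_py find_import_tokens_py find_import_tokens_py_alt
  exact pvLoop_eq line.toList 0 false []
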